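-- pv_equiv track=rewrite | github.com/Sainty717/Project-Seed | anonymizer/core/transformers.py | _fpe_encrypt_string
-- ===== SOURCE A (Python) =====
-- def _fpe_encrypt_string(value: str) -> str:
--     """FPE for general strings (character-level)"""
--     result = []
--     for char in value:
--         if char.isalnum():
--             # Simple character substitution (not cryptographically secure)
--             if char.isdigit():
--                 new_char = str((int(char) + 5) % 10)
--             elif char.isupper():
--                 idx = ord(char) - ord('A')
--                 new_idx = (idx + 13) % 26
--                 new_char = chr(ord('A') + new_idx)
--             else:
--                 idx = ord(char) - ord('a')
--                 new_idx = (idx + 13) % 26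
--                 new_char = chr(ord('a') + new_idx)
--             result.append(new_char)
--         else:
--             result.append(char)
--
--     return ''.join(result)
-- ===== SOURCE B (Python) =====
-- def _fpe_encrypt_string(value: str) -> str:
--     """FPE for general strings: translate through rotated alphabets built by slicing."""
--     lower = "abcdefghijklmnopqrstuvwxyz"
--     upper = lower.upper()
--     digits = "0123456789"
--     src = lower + upper + digits
--     dst = (lower[13:] + lower[:13]
--            + upper[13:] + upper[:13]
--            + digits[5:] + digits[:5])
--     return value.translate(str.maketrans(src, dst))
-- ===== Notes on version B (the rewrite author's own statement) =====
-- stated objective: idiomatic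
-- what changed: Instead of A's per-character branch cascade with modular arithmetic, B constructs the target alphabets by string rotation (slice concatenation lower[13:]+lower[:13], digits[5:]+digits[:5]), zips them into a translation table with str.maketrans, and delegates the whole pass to str.translate; no per-character arithmetic or branching remains.
import Mathlib
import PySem

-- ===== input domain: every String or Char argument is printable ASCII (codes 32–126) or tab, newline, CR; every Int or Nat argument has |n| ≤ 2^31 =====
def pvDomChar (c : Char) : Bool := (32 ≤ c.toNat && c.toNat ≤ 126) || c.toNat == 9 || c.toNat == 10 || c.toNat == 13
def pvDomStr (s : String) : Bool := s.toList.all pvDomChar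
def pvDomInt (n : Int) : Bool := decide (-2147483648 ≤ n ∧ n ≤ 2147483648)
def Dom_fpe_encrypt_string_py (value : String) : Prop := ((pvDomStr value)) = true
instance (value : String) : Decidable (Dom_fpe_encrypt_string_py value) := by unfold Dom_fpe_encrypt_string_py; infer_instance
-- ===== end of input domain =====

-- B builds the target alphabets by rotation (slice concatenation), zips them into a
-- translation table and delegates the pass to translate (idiomatic; no per-char arithmetic).

-- ===== PORT A =====
-- per-character loop: append the substituted character (branch cascade) to the accumulator
def fpe_encrypt_string_py (value : String) : String :=
  let result : List Char :=
    value.toList.foldl (fun acc char =>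
      if PySem.Chars.isalnum char then
        let new_char : Char :=
          if PySem.Chars.isdigit char then
            -- str((int(char) + 5) % 10) on a single digit character
            Char.ofNat (48 + ((char.toNat - 48 + 5) % 10))
          else if PySem.Chars.isupper char then
            let idx := char.toNat - 65
            let new_idx := (idx + 13) % 26
            Char.ofNat (65 + new_idx)
          else
            let idx := char.toNat - 97
            let new_idx := (idx + 13) % 26
            Char.ofNat (97 + new_idx)
        acc ++ [new_char]
      else
        acc ++ [char]) []
  String.ofList result

-- ===== PORT B =====
-- src and dst alphabets: dst is built by ROTATING each alphabet via slice concatenation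
def pvLower : List Char := "abcdefghijklmnopqrstuvwxyz".toList
def pvUpper : List Char := pvLower.map PySem.Chars.upperChar        -- lower.upper()
def pvDigits : List Char := "0123456789".toList
def pvSrc : List Char := pvLower ++ pvUpper ++ pvDigits
def pvDst : List Char :=
  PySem.List.slice pvLower (some 13) none ++ PySem.List.slice pvLower none (some 13)
  ++ PySem.List.slice pvUpper (some 13) none ++ PySem.List.slice pvUpper none (some 13)
  ++ PySem.List.slice pvDigits (some 5) none ++ PySem.List.slice pvDigits none (some 5)

-- str.maketrans(src, dst): the zipped (source, target) pairs as an association list.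
-- Exact: maketrans's keys (the chars of src) are pairwise distinct, so first-match
-- lookup in this list is the dict lookup translate performs.
def pvTrans : List (Char × Char) := pvSrc.zip pvDst

-- value.translate(table): look each char up in the table, absent characters unchanged
def fpe_encrypt_string_py_alt (value : String) : String :=
  String.ofList (value.toList.map (fun c => (pvTrans.lookup c).getD c))

-- ===== PRECONDITION & SPEC =====
def Spec_fpe_encrypt_string_py (value : String) (out : String) : Prop := out = fpe_encrypt_string_py_alt value
instance (value : String) (out : String) : Decidable (Spec_fpe_encrypt_string_py value out) := by unfold Spec_fpe_encrypt_string_py; infer_instance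

-- ===== CLAIM (what is proved, stated in full; the proofs are below) =====
def Claim_equal_fpe_encrypt_string_py : Prop := ∀ (value : String), Dom_fpe_encrypt_string_py value → Spec_fpe_encrypt_string_py value (fpe_encrypt_string_py value)

-- ===== LEMMAS AND PROOFS =====

-- A's per-character substitution, factored out of the fold for the proof
def pvStepA (char : Char) : Char :=
  if PySem.Chars.isalnum char then
    if PySem.Chars.isdigit char then
      Char.ofNat (48 + ((char.toNat - 48 + 5) % 10))
    else if PySem.Chars.isupper char then
      Char.ofNat (65 + ((char.toNat - 65 + 13) % 26))
    else
      Char.ofNat (97 + ((char.toNat - 97 + 13) % 26))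
  else char

-- the table, fully evaluated once (so the finite check below reduces a literal list)
def pvTableLit : List (Char × Char) := [('a', 'n'), ('b', 'o'), ('c', 'p'), ('d', 'q'), ('e', 'r'), ('f', 's'), ('g', 't'), ('h', 'u'), ('i', 'v'), ('j', 'w'), ('k', 'x'), ('l', 'y'), ('m', 'z'), ('n', 'a'), ('o', 'b'), ('p', 'c'), ('q', 'd'), ('r', 'e'), ('s', 'f'), ('t', 'g'), ('u', 'h'), ('v', 'i'), ('w', 'j'), ('x', 'k'), ('y', 'l'), ('z', 'm'), ('A', 'N'), ('B', 'O'), ('C', 'P'), ('D', 'Q'), ('E', 'R'), ('F', 'S'), ('G', 'T'), ('H', 'U'), ('I', 'V'), ('J', 'W'), ('K', 'X'), ('L', 'Y'), ('M', 'Z'), ('N', 'A'), ('O', 'B'), ('P', 'C'), ('Q', 'D'), ('R', 'E'), ('S', 'F'), ('T', 'G'), ('U', 'H'), ('V', 'I'), ('W', 'J'), ('X', 'K'), ('Y', 'L'), ('Z', 'M'), ('0', '5'), ('1', '6'), ('2', '7'), ('3', '8'), ('4', '9'), ('5', '0'), ('6', '1'), ('7', '2'), ('8', '3'), ('9', '4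')]

lemma pvTrans_eq_lit : pvTrans = pvTableLit := by decide

-- on every domain character the branch cascade and the table lookup agree (finite check)
set_option maxRecDepth 8192 in
lemma pvStep_eq_table : ∀ n : Fin 127,
    pvStepA (Char.ofNat n.val) = ((pvTableLit.lookup (Char.ofNat n.val)).getD (Char.ofNat n.val)) := by
  decide

lemma charLtOfDom (c : Char) (h : pvDomChar c = true) : c.toNat < 127 := by
  simp only [pvDomChar, Bool.or_eq_true, Bool.and_eq_true, decide_eq_true_eq, beq_iff_eq] at h
  omega

lemma pvStepA_eq (c : Char) (h : pvDomChar c = true) :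
    pvStepA c = (pvTrans.lookup c).getD c := by
  have := pvStep_eq_table ⟨c.toNat, charLtOfDom c h⟩
  rw [Char.ofNat_toNat] at this
  rw [pvTrans_eq_lit]
  exact this

-- ===== VERDICT (by name: the statement is the Claim_ definition above) =====
theorem fpe_encrypt_string_py_spec : Claim_equal_fpe_encrypt_string_py := by
  intro value hdom
  unfold Spec_fpe_encrypt_string_py fpe_encrypt_string_py fpe_encrypt_string_py_alt
  have hfold : (fun (acc : List Char) (char : Char) =>
      if PySem.Chars.isalnum char then
        acc ++ [if PySem.Chars.isdigit char then
            Char.ofNat (48 + ((char.toNat - 48 + 5) % 10))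
          else if PySem.Chars.isupper char then
            Char.ofNat (65 + ((char.toNat - 65 + 13) % 26))
          else
            Char.ofNat (97 + ((char.toNat - 97 + 13) % 26))]
      else acc ++ [char]) = fun acc char => acc ++ [pvStepA char] := by
    funext acc char
    simp only [pvStepA]
    split <;> rfl
  simp only [hfold, PySem.List.foldl_append_singleton_eq_map, List.nil_append]
  refine congrArg String.ofList ?_
  apply List.map_congr_left
  intro c hc
  have hcdom : pvDomChar c = true := by
    simp [Dom_fpe_encrypt_string_py, pvDomStr, List.all_eq_true] at hdom
    exact hdom c hc
  exact pvStepA_eq c hcdom
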